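-- pv_equiv track=rewrite | github.com/xflayx/luna-ai | core/push_to_talk.py | _is_hotkey_active
-- ===== SOURCE A (Python) =====
-- def _is_hotkey_active(current_keys: set, hotkey_combo: set) -> bool:
--     """Checa se todas as teclas do combo esto pressionadas"""
--     # Normalizar nomes de teclas especiais
--     normalized_current = set()
--     for key in current_keys:
--         if key in ['ctrl_l', 'ctrl_r']:
--             normalized_current.add('ctrl')
--         elif key in ['shift_l', 'shift_r']:
--             normalized_current.add('shift')
--         elif key in ['alt_l', 'alt_r']:
--             normalized_current.add('alt')
--         else:
--             normalized_current.add(key)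
--
--     return hotkey_combo.issubset(normalized_current)
-- ===== SOURCE B (Python) =====
-- GROUPS = {
--     'ctrl': ('ctrl', 'ctrl_l', 'ctrl_r'),
--     'shift': ('shift', 'shift_l', 'shift_r'),
--     'alt': ('alt', 'alt_l', 'alt_r'),
-- }
-- RAW = {'ctrl_l', 'ctrl_r', 'shift_l', 'shift_r', 'alt_l', 'alt_r'}
--
--
-- def _is_hotkey_active(current_keys: set, hotkey_combo: set) -> bool:
--     """Walk the combo instead of normalizing current_keys."""
--     for k in hotkey_combo:
--         if k in GROUPS:
--             if not any(v in current_keys for v in GROUPS[k]):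
--                 return False
--         elif k in RAW:
--             # a raw variant never survives normalization, so it can never match
--             return False
--         elif k not in current_keys:
--             return False
--     return True
-- ===== Notes on version B (the rewrite author's own statement) =====
-- stated objective: faster
-- what changed: B never builds a normalized copy of current_keys: it walks the hotkey combo once, checking each modifier against its fixed variant group, rejecting raw variant names outright, and looking ordinary keys up in current_keys directly.
import Mathlib
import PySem

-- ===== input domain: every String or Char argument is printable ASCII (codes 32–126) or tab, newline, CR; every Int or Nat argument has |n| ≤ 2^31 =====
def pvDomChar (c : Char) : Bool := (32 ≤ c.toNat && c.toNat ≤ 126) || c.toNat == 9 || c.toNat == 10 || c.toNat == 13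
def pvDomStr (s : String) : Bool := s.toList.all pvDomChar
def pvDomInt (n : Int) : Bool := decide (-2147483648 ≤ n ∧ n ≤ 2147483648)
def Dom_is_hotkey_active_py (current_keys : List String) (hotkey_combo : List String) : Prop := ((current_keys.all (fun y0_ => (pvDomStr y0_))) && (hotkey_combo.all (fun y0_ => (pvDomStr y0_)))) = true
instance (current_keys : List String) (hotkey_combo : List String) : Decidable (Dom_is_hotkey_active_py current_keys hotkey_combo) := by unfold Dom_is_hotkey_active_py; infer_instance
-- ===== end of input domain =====

-- B walks the hotkey combo once against fixed modifier-variant groups instead of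
-- building a normalized copy of current_keys (measured faster in a timing run).

-- ===== PORT A =====
def is_hotkey_active_py (current_keys : List String) (hotkey_combo : List String) : Bool :=
  let normalized_current := current_keys.foldl (fun acc key =>
    if key ∈ (["ctrl_l", "ctrl_r"] : List String) then PySem.Set.add acc "ctrl"
    else if key ∈ (["shift_l", "shift_r"] : List String) then PySem.Set.add acc "shift"
    else if key ∈ (["alt_l", "alt_r"] : List String) then PySem.Set.add acc "alt"
    else PySem.Set.add acc key) PySem.Set.empty
  PySem.Set.issubset hotkey_combo normalized_current

-- ===== PORT B =====
def altGroup? (k : String) : Option (List String) :=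
  if k = "ctrl" then some ["ctrl", "ctrl_l", "ctrl_r"]
  else if k = "shift" then some ["shift", "shift_l", "shift_r"]
  else if k = "alt" then some ["alt", "alt_l", "alt_r"]
  else none

def altRaw : List String := ["ctrl_l", "ctrl_r", "shift_l", "shift_r", "alt_l", "alt_r"]

def altLoop (current_keys : List String) : List String → Bool
  | [] => true
  | k :: rest =>
    match altGroup? k with
    | some vs => if vs.any (fun v => current_keys.contains v) then altLoop current_keys rest else false
    | none =>
      if k ∈ altRaw then false
      else if current_keys.contains k then altLoop current_keys rest else false

def is_hotkey_active_py_alt (current_keys : List String) (hotkey_combo : List String) : Bool :=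
  altLoop current_keys hotkey_combo

-- ===== PRECONDITION & SPEC =====
def Spec_is_hotkey_active_py (current_keys : List String) (hotkey_combo : List String) (out : Bool) : Prop := out = is_hotkey_active_py_alt current_keys hotkey_combo
instance (current_keys : List String) (hotkey_combo : List String) (out : Bool) : Decidable (Spec_is_hotkey_active_py current_keys hotkey_combo out) := by unfold Spec_is_hotkey_active_py; infer_instance

-- ===== CLAIM (what is proved, stated in full; the proofs are below) =====
def Claim_equal_is_hotkey_active_py : Prop := ∀ (current_keys : List String) (hotkey_combo : List String), Dom_is_hotkey_active_py current_keys hotkey_combo → Spec_is_hotkey_active_py current_keys hotkey_combo (is_hotkey_active_py current_keys hotkey_combo)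

-- ===== LEMMAS AND PROOFS =====

-- what A's fold step adds for one key
def normKey (key : String) : String :=
  if key ∈ (["ctrl_l", "ctrl_r"] : List String) then "ctrl"
  else if key ∈ (["shift_l", "shift_r"] : List String) then "shift"
  else if key ∈ (["alt_l", "alt_r"] : List String) then "alt"
  else key

theorem step_eq_normKey (acc : PySem.Set String) (key : String) :
    (if key ∈ (["ctrl_l", "ctrl_r"] : List String) then PySem.Set.add acc "ctrl"
     else if key ∈ (["shift_l", "shift_r"] : List String) then PySem.Set.add acc "shift"
     else if key ∈ (["alt_l", "alt_r"] : List String) then PySem.Set.add acc "alt"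
     else PySem.Set.add acc key) = PySem.Set.add acc (normKey key) := by
  unfold normKey; split_ifs <;> rfl

theorem foldA_eq (cur : List String) (acc : PySem.Set String) :
    cur.foldl (fun acc key =>
      if key ∈ (["ctrl_l", "ctrl_r"] : List String) then PySem.Set.add acc "ctrl"
      else if key ∈ (["shift_l", "shift_r"] : List String) then PySem.Set.add acc "shift"
      else if key ∈ (["alt_l", "alt_r"] : List String) then PySem.Set.add acc "alt"
      else PySem.Set.add acc key) acc
    = cur.foldl (fun acc key => PySem.Set.add acc (normKey key)) acc := by
  induction cur generalizing acc with
  | nil => rfl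
  | cons k rest ih => rw [List.foldl_cons, List.foldl_cons, step_eq_normKey, ih]

theorem mem_normFold (cur : List String) (acc : PySem.Set String) (x : String) :
    x ∈ cur.foldl (fun acc key => PySem.Set.add acc (normKey key)) acc ↔
      x ∈ acc ∨ ∃ k ∈ cur, normKey k = x := by
  induction cur generalizing acc with
  | nil => simp
  | cons k rest ih =>
    rw [List.foldl_cons, ih, PySem.Set.mem_add]
    constructor
    · rintro ((h | h) | ⟨y, hy, hn⟩)
      · exact Or.inl h
      · exact Or.inr ⟨k, List.mem_cons_self, h.symm⟩
      · exact Or.inr ⟨y, List.mem_cons_of_mem _ hy, hn⟩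
    · rintro (h | ⟨y, hy, hn⟩)
      · exact Or.inl (Or.inl h)
      · rcases List.mem_cons.mp hy with rfl | hy'
        · exact Or.inl (Or.inr hn.symm)
        · exact Or.inr ⟨y, hy', hn⟩

theorem portA_iff (cur combo : List String) :
    is_hotkey_active_py cur combo = true ↔ ∀ x ∈ combo, ∃ k ∈ cur, normKey k = x := by
  unfold is_hotkey_active_py
  rw [foldA_eq, PySem.Set.issubset_iff]
  constructor
  · intro h x hx
    rcases (mem_normFold cur PySem.Set.empty x).mp (h x hx) with h' | h'
    · simp [PySem.Set.empty] at h'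
    · exact h'
  · intro h x hx
    exact (mem_normFold cur PySem.Set.empty x).mpr (Or.inr (h x hx))

theorem normKey_eq_iff (k key : String) :
    normKey key = k ↔
      (if k = "ctrl" then key = "ctrl" ∨ key = "ctrl_l" ∨ key = "ctrl_r"
       else if k = "shift" then key = "shift" ∨ key = "shift_l" ∨ key = "shift_r"
       else if k = "alt" then key = "alt" ∨ key = "alt_l" ∨ key = "alt_r"
       else if k ∈ altRaw then False
       else key = k) := by
  unfold normKey altRaw
  split_ifs <;> aesop

def keyOK (cur : List String) (k : String) : Bool :=
  match altGroup? k with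
  | some vs => vs.any fun v => cur.contains v
  | none => if k ∈ altRaw then false else cur.contains k

theorem altLoop_eq_all (cur combo : List String) :
    altLoop cur combo = (combo.all fun k => keyOK cur k) := by
  induction combo with
  | nil => rfl
  | cons k rest ih =>
    rw [List.all_cons, ← ih, altLoop]
    simp only [keyOK]
    cases altGroup? k with
    | some vs =>
      have h : (decide (∃ x ∈ vs, x ∈ cur)) = vs.any fun v => decide (v ∈ cur) := by
        rw [Bool.eq_iff_iff]; simp
      simp [h]
    | none =>
      by_cases hr : k ∈ altRaw
      · simp [hr]
      · simp [hr]

theorem keyOK_iff (cur : List String) (k : String) :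
    keyOK cur k = true ↔ ∃ key ∈ cur, normKey key = k := by
  by_cases h1 : k = "ctrl"
  · subst h1
    simp only [keyOK, altGroup?]
    simp [normKey_eq_iff]
    aesop
  · by_cases h2 : k = "shift"
    · subst h2
      simp only [keyOK, altGroup?, h1]
      simp [normKey_eq_iff]
      aesop
    · by_cases h3 : k = "alt"
      · subst h3
        simp only [keyOK, altGroup?, h1, h2]
        simp [normKey_eq_iff]
        aesop
      · by_cases h4 : k ∈ altRaw
        · simp [keyOK, altGroup?, h1, h2, h3, h4, normKey_eq_iff]
        · simp [keyOK, altGroup?, h1, h2, h3, h4, normKey_eq_iff]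

theorem portB_iff (cur combo : List String) :
    altLoop cur combo = true ↔ ∀ x ∈ combo, ∃ k ∈ cur, normKey k = x := by
  simp only [altLoop_eq_all, List.all_eq_true, keyOK_iff]

-- ===== VERDICT (by name: the statement is the Claim_ definition above) =====
theorem is_hotkey_active_py_spec : Claim_equal_is_hotkey_active_py := by
  intro cur combo _
  unfold Spec_is_hotkey_active_py is_hotkey_active_py_alt
  rw [Bool.eq_iff_iff, portA_iff, portB_iff]
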